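-- pv_equiv track=rewrite | github.com/miliar/Code_Jam_Webscraper | solutions_python/Problem_117/709.py | lawn
-- ===== SOURCE A (Python) =====
-- def lawn(y, x, input):
--     yh = [max(input[i]) for i in range(y)]
--     xh = [max([input[i][j] for i in range(y)]) for j in range(x)]
--
--     for i in range(y):
--         for j in range(x):
--             if input[i][j] < yh[i] and input[i][j] < xh[j]:
--                 return 'NO'
--     return 'YES'
-- ===== SOURCE B (Python) =====
-- def lawn(y, x, input):
--     # Recompute row/column maxima on the fly instead of precomputing index tables.
--     for i in range(y):
--         row = input[i]
--         row_max = max(row)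
--         for j in range(x):
--             if row[j] != row_max:
--                 if row[j] != max([input[k][j] for k in range(y)]):
--                     return 'NO'
--     return 'YES'
-- ===== Notes on version B (the rewrite author's own statement) =====
-- stated objective: alternative
-- what changed: B drops A's precomputed yh/xh maxima tables and instead rescans the row and (lazily, only when the row max does not match) the column for each cell, comparing with != instead of <.
import Mathlib
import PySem

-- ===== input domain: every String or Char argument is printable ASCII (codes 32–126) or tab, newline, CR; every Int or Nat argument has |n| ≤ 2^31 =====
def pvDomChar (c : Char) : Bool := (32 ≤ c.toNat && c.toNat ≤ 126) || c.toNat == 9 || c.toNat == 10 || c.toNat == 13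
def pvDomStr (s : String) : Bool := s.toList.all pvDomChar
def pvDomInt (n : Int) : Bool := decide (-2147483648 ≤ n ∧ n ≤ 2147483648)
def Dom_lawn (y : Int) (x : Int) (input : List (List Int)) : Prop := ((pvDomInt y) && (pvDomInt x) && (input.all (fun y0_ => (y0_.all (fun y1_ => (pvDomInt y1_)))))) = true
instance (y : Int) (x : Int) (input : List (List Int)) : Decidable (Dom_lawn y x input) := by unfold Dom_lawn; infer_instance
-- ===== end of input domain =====

-- B recomputes row/column maxima on the fly (column lazily) instead of A's precomputed yh/xh tables; objective: alternative.


-- ===== PORT A =====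
def lawn (y : Int) (x : Int) (input : List (List Int)) : String :=
  let yh : List Int :=
    (PySem.List.pyRange 0 y 1).map (fun i =>
      (PySem.List.max? (PySem.List.pyGetD input i []) (fun v => v)).getD 0)
  let xh : List Int :=
    (PySem.List.pyRange 0 x 1).map (fun j =>
      (PySem.List.max? ((PySem.List.pyRange 0 y 1).map (fun i =>
          PySem.List.pyGetD (PySem.List.pyGetD input i []) j 0)) (fun v => v)).getD 0)
  if (PySem.List.pyRange 0 y 1).any (fun i =>
      (PySem.List.pyRange 0 x 1).any (fun j =>
        decide (PySem.List.pyGetD (PySem.List.pyGetD input i []) j 0 < PySem.List.pyGetD yh i 0) &&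
        decide (PySem.List.pyGetD (PySem.List.pyGetD input i []) j 0 < PySem.List.pyGetD xh j 0)))
  then "NO" else "YES"

-- ===== PORT B =====
def lawn_alt (y : Int) (x : Int) (input : List (List Int)) : String :=
  if (PySem.List.pyRange 0 y 1).any (fun i =>
      let row := PySem.List.pyGetD input i []
      let rowMax := (PySem.List.max? row (fun v => v)).getD 0
      (PySem.List.pyRange 0 x 1).any (fun j =>
        decide (PySem.List.pyGetD row j 0 ≠ rowMax) &&
        decide (PySem.List.pyGetD row j 0 ≠
          (PySem.List.max? ((PySem.List.pyRange 0 y 1).map (fun k =>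
              PySem.List.pyGetD (PySem.List.pyGetD input k []) j 0)) (fun v => v)).getD 0)))
  then "NO" else "YES"

-- ===== PRECONDITION & SPEC =====
-- Pre_ excludes exactly the inputs where A raises: y > len(input), a row among the first y
-- empty or shorter than x (IndexError/ValueError), and y ≤ 0 with x > 0 (max of the empty
-- column comprehension raises ValueError).
def Pre_lawn (y : Int) (x : Int) (input : List (List Int)) : Prop :=
  if y ≤ 0 then x ≤ 0
  else y ≤ (input.length : Int) ∧
    ∀ row ∈ input.take y.toNat, 1 ≤ row.length ∧ x ≤ (row.length : Int)
instance (y : Int) (x : Int) (input : List (List Int)) : Decidable (Pre_lawn y x input) := by unfold Pre_lawn; infer_instance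
def pvWitness_lawn : Int × Int × List (List Int) := (2, 2, [[1, 2], [2, 2]])
def Spec_lawn (y : Int) (x : Int) (input : List (List Int)) (out : String) : Prop := out = lawn_alt y x input
instance (y : Int) (x : Int) (input : List (List Int)) (out : String) : Decidable (Spec_lawn y x input out) := by unfold Spec_lawn; infer_instance

-- ===== CLAIM (what is proved, stated in full; the proofs are below) =====
def Claim_equal_lawn : Prop := ∀ (y : Int) (x : Int) (input : List (List Int)), Dom_lawn y x input → Pre_lawn y x input → Spec_lawn y x input (lawn y x input)

-- ===== LEMMAS AND PROOFS =====

theorem any_congr_mem {α : Type} {l : List α} {p q : α → Bool}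
    (h : ∀ a ∈ l, p a = q a) : l.any p = l.any q := by
  induction l with
  | nil => rfl
  | cons hd tl ih =>
    simp only [List.any_cons]
    rw [h hd (List.mem_cons_self), ih (fun a ha => h a (List.mem_cons_of_mem hd ha))]

theorem max?_getD_ge {xs : List Int} {v : Int} (hv : v ∈ xs) :
    v ≤ (PySem.List.max? xs (fun v => v)).getD 0 := by
  cases h : PySem.List.max? xs (fun v => v) with
  | none =>
    rw [PySem.List.max?_eq_none_iff] at h
    subst h; cases hv
  | some m => exact PySem.List.max?_isMax h v hv

theorem lawn_eq_alt (y : Int) (x : Int) (input : List (List Int))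
    (hpre : Pre_lawn y x input) : lawn y x input = lawn_alt y x input := by
  unfold lawn lawn_alt
  simp only []
  congr 1
  congr 1
  apply any_congr_mem
  intro i hi
  rw [PySem.List.mem_pyRange_one] at hi
  have hy : 0 < y := lt_of_le_of_lt hi.1 hi.2
  unfold Pre_lawn at hpre
  rw [if_neg (by omega)] at hpre
  obtain ⟨hylen, hrows⟩ := hpre
  have hilen : i < (input.length : Int) := lt_of_lt_of_le hi.2 hylen
  have hrow_eq : PySem.List.pyGetD input i [] = input[i.toNat]'(by omega) :=
    PySem.List.pyGetD_eq_getElem input [] hi.1 hilen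
  have hrow_mem : input[i.toNat]'(by omega) ∈ input.take y.toNat := by
    have h1 : i.toNat < y.toNat := by omega
    have h2 : i.toNat < (input.take y.toNat).length := by
      simp [List.length_take]; omega
    have := List.getElem_mem h2
    rwa [List.getElem_take] at this
  obtain ⟨hlen1, hlenx⟩ := hrows _ hrow_mem
  apply any_congr_mem
  intro j hj
  rw [PySem.List.mem_pyRange_one] at hj
  -- yh[i] is the row max, xh[j] is the column max
  rw [PySem.List.pyGetD_map_pyRange_of_nonneg _ y i _ hi.1 hi.2]
  rw [PySem.List.pyGetD_map_pyRange_of_nonneg _ x j _ hj.1 hj.2]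
  set row := PySem.List.pyGetD input i [] with hrowdef
  have hjlen : j < (row.length : Int) := by
    rw [hrow_eq]; exact lt_of_lt_of_le hj.2 hlenx
  have hv_mem : PySem.List.pyGetD row j 0 ∈ row := by
    rw [PySem.List.pyGetD_eq_getElem row 0 hj.1 hjlen]
    exact List.getElem_mem (by omega)
  have hvm : PySem.List.pyGetD row j 0 ≤ (PySem.List.max? row (fun v => v)).getD 0 :=
    max?_getD_ge hv_mem
  have hvc : PySem.List.pyGetD row j 0 ≤
      (PySem.List.max? ((PySem.List.pyRange 0 y 1).map (fun k =>
        PySem.List.pyGetD (PySem.List.pyGetD input k []) j 0)) (fun v => v)).getD 0 := by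
    apply max?_getD_ge
    exact List.mem_map.mpr ⟨i, PySem.List.mem_pyRange_one.mpr hi, rfl⟩
  have h1 : decide (PySem.List.pyGetD row j 0 < (PySem.List.max? row (fun v => v)).getD 0)
      = decide (PySem.List.pyGetD row j 0 ≠ (PySem.List.max? row (fun v => v)).getD 0) :=
    decide_eq_decide.mpr (by omega)
  have h2 : decide (PySem.List.pyGetD row j 0 <
        (PySem.List.max? ((PySem.List.pyRange 0 y 1).map (fun k =>
          PySem.List.pyGetD (PySem.List.pyGetD input k []) j 0)) (fun v => v)).getD 0)
      = decide (PySem.List.pyGetD row j 0 ≠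
        (PySem.List.max? ((PySem.List.pyRange 0 y 1).map (fun k =>
          PySem.List.pyGetD (PySem.List.pyGetD input k []) j 0)) (fun v => v)).getD 0) :=
    decide_eq_decide.mpr (by omega)
  rw [h1, h2]

-- ===== VERDICT (by name: the statement is the Claim_ definition above) =====
theorem lawn_spec : Claim_equal_lawn := by
  intro y x input _ hpre
  unfold Spec_lawn
  exact lawn_eq_alt y x input hpre
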